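-- pv_equiv track=rewrite | github.com/GunvantGMC/Competitive-Programing | subArrayCount.py | totalDistincts
-- ===== SOURCE A (Python) =====
-- def totalDistincts(N, A):
--     A = list(map(int, A))
--     t = []
--     for i in range(2, N+1):
--         temp = []
--         for j in range(0, N-1, i-1):
--             temp = A[j: i+j]
--             df = temp[0]
--             for k in range(1, len(temp)):
--                 df -= temp[k]
--             t.append(df)
--     return len(list(set(t)))
-- ===== SOURCE B (Python) =====
-- def totalDistincts(N, A):
--     A = [int(x) for x in A]
--     n = len(A)
--     pre = [0]
--     for v in A:
--         pre.append(pre[-1] + v)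
--     seen = set()
--     for i in range(2, N + 1):
--         for j in range(0, N - 1, i - 1):
--             end = min(i + j, n)
--             seen.add(2 * A[j] - (pre[end] - pre[j]))
--     return len(seen)
-- ===== Notes on version B (the rewrite author's own statement) =====
-- stated objective: faster
-- what changed: Replaces A's inner O(length) subtraction loop over each slice with an O(1) prefix-sum formula (df = 2*A[j] - (pre[end]-pre[j])) and accumulates the distinct values directly in a set instead of a list deduplicated at the end.
import Mathlib
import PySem

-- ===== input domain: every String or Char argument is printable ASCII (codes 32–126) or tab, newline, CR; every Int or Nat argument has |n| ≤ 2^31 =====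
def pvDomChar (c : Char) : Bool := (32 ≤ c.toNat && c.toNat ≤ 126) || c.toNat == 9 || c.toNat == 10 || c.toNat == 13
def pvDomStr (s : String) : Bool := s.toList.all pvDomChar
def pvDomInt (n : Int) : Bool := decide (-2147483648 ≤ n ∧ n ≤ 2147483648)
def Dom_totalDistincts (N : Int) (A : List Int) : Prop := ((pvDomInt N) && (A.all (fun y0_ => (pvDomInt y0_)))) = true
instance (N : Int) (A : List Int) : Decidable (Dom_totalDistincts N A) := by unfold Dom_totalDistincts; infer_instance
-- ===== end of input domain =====

-- B replaces A's inner per-slice subtraction loop by an O(1) prefix-sum formula and collects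
-- the values directly in a set (objective: faster).

-- ===== PORT A =====
-- literal transliteration of Source A; temp[0]/temp[k] are in range under Pre_ (the getD 0
-- defaults are never reached there)
def totalDistincts (N : Int) (A : List Int) : Int :=
  let t : List Int :=
    (PySem.List.pyRange 2 (N + 1) 1).foldl (fun t i =>
      (PySem.List.pyRange 0 (N - 1) (i - 1)).foldl (fun t j =>
        let temp := PySem.List.slice A (some j) (some (i + j))
        let df := PySem.List.pyGetD temp 0 0
        let df := (PySem.List.pyRange 1 (PySem.List.len temp) 1).foldl
          (fun df k => df - PySem.List.pyGetD temp k 0) df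
        t ++ [df]) t) []
  PySem.Set.len (PySem.Set.ofList t)

-- ===== PORT B =====
-- B helper: pre = [0]; for v in A: pre.append(pre[-1] + v)
def pvPrefixSums (A : List Int) : List Int :=
  A.foldl (fun pre v => pre ++ [PySem.List.pyGetD pre (-1) 0 + v]) [0]

def totalDistincts_alt (N : Int) (A : List Int) : Int :=
  let n := PySem.List.len A
  let pre := pvPrefixSums A
  let seen : PySem.Set Int :=
    (PySem.List.pyRange 2 (N + 1) 1).foldl (fun s i =>
      (PySem.List.pyRange 0 (N - 1) (i - 1)).foldl (fun s j =>
        let e := min (i + j) n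
        PySem.Set.add s
          (2 * PySem.List.pyGetD A j 0 -
            (PySem.List.pyGetD pre e 0 - PySem.List.pyGetD pre j 0))) s) PySem.Set.empty
  PySem.Set.len seen

-- ===== PRECONDITION & SPEC =====
-- A (and likewise B) raises IndexError exactly when N ≥ 2 and len(A) < N-1 (the inner
-- index j then runs past the end of A); Pre_ is exactly the complement of that region.
def Pre_totalDistincts (N : Int) (A : List Int) : Prop :=
  N ≤ 1 ∨ N - 1 ≤ (A.length : Int)
instance (N : Int) (A : List Int) : Decidable (Pre_totalDistincts N A) := by
  unfold Pre_totalDistincts; infer_instance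

def pvWitness_totalDistincts : Int × List Int := (4, [1, 2, 3, 4])

def Spec_totalDistincts (N : Int) (A : List Int) (out : Int) : Prop := out = totalDistincts_alt N A
instance (N : Int) (A : List Int) (out : Int) : Decidable (Spec_totalDistincts N A out) := by unfold Spec_totalDistincts; infer_instance

-- ===== CLAIM (what is proved, stated in full; the proofs are below) =====
def Claim_equal_totalDistincts : Prop := ∀ (N : Int) (A : List Int), Dom_totalDistincts N A → Pre_totalDistincts N A → Spec_totalDistincts N A (totalDistincts N A)

-- ===== LEMMAS AND PROOFS =====

-- the per-(i,j) value A appends: temp = A[j:i+j], temp[0] minus the rest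
def pvFA (A : List Int) (i j : Int) : Int :=
  let temp := PySem.List.slice A (some j) (some (i + j))
  let df := PySem.List.pyGetD temp 0 0
  (PySem.List.pyRange 1 (PySem.List.len temp) 1).foldl
    (fun df k => df - PySem.List.pyGetD temp k 0) df

-- the per-(i,j) value B adds: the prefix-sum formula
def pvFB (A : List Int) (i j : Int) : Int :=
  2 * PySem.List.pyGetD A j 0 -
    (PySem.List.pyGetD (pvPrefixSums A) (min (i + j) (PySem.List.len A)) 0 -
     PySem.List.pyGetD (pvPrefixSums A) j 0)

theorem pvFoldlSub (l : List Int) (init : Int) :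
    l.foldl (fun a b => a - b) init = init - l.sum := by
  induction l generalizing init with
  | nil => simp
  | cons x xs ih => simp [List.foldl_cons, ih]; ring

theorem pvPrefix_eq (A : List Int) :
    pvPrefixSums A = (List.range (A.length + 1)).map (fun k => (A.take k).sum) := by
  induction A using List.reverseRecOn with
  | nil => rfl
  | append_singleton A v ih =>
    unfold pvPrefixSums at ih ⊢
    rw [List.foldl_append, List.foldl_cons, List.foldl_nil, ih, List.range_succ (n := A.length),
        List.map_append]
    simp only [List.map_cons, List.map_nil]
    rw [PySem.List.pyGetD_neg_one_append_singleton]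
    rw [List.length_append, List.length_cons, List.length_nil]
    rw [List.range_succ (n := A.length + 1), List.map_append]
    congr 1
    · rw [List.range_succ (n := A.length), List.map_append]
      congr 1
      · exact List.map_congr_left (fun k hk => by
          rw [List.take_append_of_le_length (by simpa using (List.mem_range.mp hk).le)])
      · simp
    · simp

theorem pvPrefix_getD (A : List Int) (t : Nat) (h : t ≤ A.length) :
    (pvPrefixSums A).getD t 0 = (A.take t).sum := by
  rw [pvPrefix_eq]
  exact PySem.List.getD_map_range _ _ _ _ (by omega)

theorem pvPrefix_length (A : List Int) : (pvPrefixSums A).length = A.length + 1 := by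
  rw [pvPrefix_eq]; simp

theorem pvSetFold {α : Type} (l : List α) (g : α → List Int) (acc : List Int) :
    l.foldl (fun s i => PySem.Set.update s (g i)) (PySem.Set.ofList acc)
      = PySem.Set.ofList (acc ++ l.flatMap g) := by
  induction l generalizing acc with
  | nil => simp
  | cons x xs ih =>
    rw [List.foldl_cons, ← PySem.Set.ofList_append, ih, List.flatMap_cons, List.append_assoc]

theorem pvVal_eq (A : List Int) (i j : Int) (hi : 2 ≤ i) (hj0 : 0 ≤ j)
    (hj : j < (A.length : Int)) : pvFA A i j = pvFB A i j := by
  unfold pvFA pvFB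
  have hIJ : (0:Int) ≤ i + j := by omega
  have hJlt : j.toNat < A.length := by omega
  have hM : 2 ≤ (i + j).toNat - j.toNat := by omega
  rw [PySem.List.slice_toNat A hj0 hIJ]
  rw [PySem.List.foldl_pyRange_pyGetD _ 0 (fun a b => a - b) _ (by norm_num)]
  rw [pvFoldlSub]
  set J := j.toNat with hJdef
  set M := (i + j).toNat - J with hMdef
  set temp := (A.drop J).take M with htempdef
  have htsum : temp.sum = (A.take (J + M)).sum - (A.take J).sum := by
    have := List.take_add (l := A) (i := J) (j := M)
    have h2 : (A.take (J + M)).sum = (A.take J).sum + temp.sum := by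
      rw [this, List.sum_append]
    omega
  have h0q : temp[0]? = some A[J] := by
    rw [htempdef, List.getElem?_take_of_lt (by omega), List.getElem?_drop,
        Nat.add_zero, List.getElem?_eq_getElem hJlt]
  rcases htemp : temp with _ | ⟨h0, t0⟩
  · rw [htemp] at h0q; simp at h0q
  · rw [htemp] at h0q
    have hh0 : h0 = A[J] := by simpa using h0q
    have ht0 : t0.sum = (A.take (J + M)).sum - (A.take J).sum - h0 := by
      rw [htemp] at htsum; simp [List.sum_cons] at htsum; omega
    simp only [Int.toNat_one]
    rw [PySem.List.pyGetD_zero_cons, List.drop_one, List.tail_cons]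
    have hlenpre : (pvPrefixSums A).length = A.length + 1 := pvPrefix_length A
    have hge : PySem.List.pyGetD A j 0 = A[J] := by
      rw [PySem.List.pyGetD_eq_getElem A 0 hj0 (by omega)]
    have hlA := PySem.List.len_eq (xs := A)
    have hemin : (0:Int) ≤ min (i + j) (PySem.List.len A) := by omega
    have hpre_e : PySem.List.pyGetD (pvPrefixSums A) (min (i + j) (PySem.List.len A)) 0
        = (A.take (min (i + j) (PySem.List.len A)).toNat).sum := by
      rw [PySem.List.pyGetD_eq_getElem _ 0 hemin (by omega)]
      rw [← List.getD_eq_getElem _ 0, pvPrefix_getD _ _ (by omega)]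
    have hpre_j : PySem.List.pyGetD (pvPrefixSums A) j 0 = (A.take J).sum := by
      rw [PySem.List.pyGetD_eq_getElem _ 0 hj0 (by omega)]
      rw [← List.getD_eq_getElem _ 0, pvPrefix_getD _ _ (by omega)]
    have hmin : (min (i + j) (PySem.List.len A)).toNat = min (J + M) A.length := by omega
    have htake : (A.take (J + M)).sum = (A.take (min (J + M) A.length)).sum := by
      rw [← List.take_eq_take_min]
    subst hh0
    rw [hge, hpre_e, hpre_j, hmin, ← htake, ht0]
    ring

theorem pvA_shape (N : Int) (A : List Int) :
    (PySem.List.pyRange 2 (N + 1) 1).foldl (fun t i =>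
        (PySem.List.pyRange 0 (N - 1) (i - 1)).foldl (fun t j => t ++ [pvFA A i j]) t)
      ([] : List Int)
    = (PySem.List.pyRange 2 (N + 1) 1).flatMap (fun i =>
        (PySem.List.pyRange 0 (N - 1) (i - 1)).map (pvFA A i)) := by
  rw [PySem.List.foldl_congr_mem _ _
        (fun t i => t ++ (PySem.List.pyRange 0 (N - 1) (i - 1)).map (pvFA A i)) _
        (fun acc x _ => PySem.List.foldl_append_singleton_eq_map _ _ _)]
  exact (PySem.List.foldl_append_eq_flatMap _ _ _).trans (by simp)

theorem pvB_shape (N : Int) (A : List Int) :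
    (PySem.List.pyRange 2 (N + 1) 1).foldl (fun s i =>
        (PySem.List.pyRange 0 (N - 1) (i - 1)).foldl (fun s j => PySem.Set.add s (pvFB A i j)) s)
      PySem.Set.empty
    = PySem.Set.ofList ((PySem.List.pyRange 2 (N + 1) 1).flatMap (fun i =>
        (PySem.List.pyRange 0 (N - 1) (i - 1)).map (pvFB A i))) := by
  rw [PySem.List.foldl_congr_mem _ _
        (fun s i => PySem.Set.update s ((PySem.List.pyRange 0 (N - 1) (i - 1)).map (pvFB A i))) _
        (fun acc x _ => (PySem.Set.update_map_eq_foldl_add _ _ _).symm)]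
  have h0 : (PySem.Set.empty : PySem.Set Int) = PySem.Set.ofList ([] : List Int) := rfl
  rw [h0, pvSetFold]
  simp

theorem pvA_eq (N : Int) (A : List Int) :
    totalDistincts N A
    = PySem.Set.len (PySem.Set.ofList ((PySem.List.pyRange 2 (N + 1) 1).flatMap (fun i =>
        (PySem.List.pyRange 0 (N - 1) (i - 1)).map (pvFA A i)))) :=
  congrArg (fun t => PySem.Set.len (PySem.Set.ofList t)) (pvA_shape N A)

theorem pvB_eq (N : Int) (A : List Int) :
    totalDistincts_alt N A
    = PySem.Set.len (PySem.Set.ofList ((PySem.List.pyRange 2 (N + 1) 1).flatMap (fun i =>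
        (PySem.List.pyRange 0 (N - 1) (i - 1)).map (pvFB A i)))) :=
  congrArg PySem.Set.len (pvB_shape N A)

-- ===== VERDICT (by name: the statement is the Claim_ definition above) =====
theorem totalDistincts_spec : Claim_equal_totalDistincts := by
  intro N A _ hpre
  unfold Spec_totalDistincts
  rw [pvA_eq, pvB_eq]
  apply congrArg
  apply congrArg
  apply List.flatMap_congr
  intro i hi
  obtain ⟨hi2, hiN⟩ := PySem.List.mem_pyRange_one.mp hi
  refine List.map_congr_left (fun j hj => ?_)
  obtain ⟨hj0, hjN, -⟩ := ((PySem.List.mem_pyRange_iff_of_pos (by omega)) j).mp hj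
  have hlen : N - 1 ≤ (A.length : Int) := by
    rcases hpre with h | h
    · omega
    · exact h
  exact pvVal_eq A i j hi2 hj0 (by omega)
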